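-- pv_equiv track=rewrite | github.com/nish4033/dsa | strings/amazing_subarrays.py | solve
-- ===== SOURCE A (Python) =====
-- def solve(A):
--     count = 0
--     ans = 0
--     vowel = ["a", "e", "i", "o", "u"]
--     for i in A:
--         if i.lower() in vowel:
--             count += 1
--         ans = ans + count
--     return ans
-- ===== SOURCE B (Python) =====
-- def solve(A):
--     n = len(A)
--     return sum(n - i for i, c in enumerate(A) if c.lower() in "aeiou")
-- ===== Notes on version B (the rewrite author's own statement) =====
-- stated objective: alternative
-- what changed: B drops the running vowel counter and the per-step cumulative addition entirely: each vowel at index i is credited its full contribution len(A)-i directly in a single generator-sum over enumerate(A).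
import Mathlib
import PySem

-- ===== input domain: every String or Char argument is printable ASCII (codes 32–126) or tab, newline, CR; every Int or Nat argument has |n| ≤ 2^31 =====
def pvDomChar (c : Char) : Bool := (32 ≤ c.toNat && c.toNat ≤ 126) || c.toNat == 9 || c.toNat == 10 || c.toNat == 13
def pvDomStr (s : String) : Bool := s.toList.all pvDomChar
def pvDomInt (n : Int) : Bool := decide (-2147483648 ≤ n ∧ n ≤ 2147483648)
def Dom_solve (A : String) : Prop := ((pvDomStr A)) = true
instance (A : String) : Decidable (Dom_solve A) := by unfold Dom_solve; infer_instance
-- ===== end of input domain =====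

-- B replaces A's running vowel counter by each vowel's direct positional contribution len(A)-i (alternative decomposition, same cost).

-- ===== PORT A =====
-- A: running count of vowels seen so far; ans accumulates the running count at every character.
def solve (A : String) : Int :=
  (A.toList.foldl
    (fun (st : Int × Int) (i : Char) =>
      let count := if PySem.Str.lower (String.mk [i]) ∈ (["a", "e", "i", "o", "u"] : List String)
        then st.1 + 1 else st.1
      (count, st.2 + count))
    (0, 0)).2

-- ===== PORT B =====
-- B: sum over enumerate(A) of (n - i) for each character whose lowercase form is a vowel.
def solve_alt (A : String) : Int :=
  let n : Int := PySem.Str.len A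
  (PySem.List.enumerate A.toList 0).foldl
    (fun acc p => if PySem.Chars.lowerChar p.2 ∈ "aeiou".toList then acc + (n - p.1) else acc) 0

-- ===== PRECONDITION & SPEC =====
def Spec_solve (A : String) (out : Int) : Prop := out = solve_alt A
instance (A : String) (out : Int) : Decidable (Spec_solve A out) := by unfold Spec_solve; infer_instance

-- ===== CLAIM (what is proved, stated in full; the proofs are below) =====
def Claim_equal_solve : Prop := ∀ (A : String), Dom_solve A → Spec_solve A (solve A)

-- ===== LEMMAS AND PROOFS =====

-- the common vowel test on a character
def pvIsV (c : Char) : Bool := decide (PySem.Chars.lowerChar c ∈ (['a', 'e', 'i', 'o', 'u'] : List Char))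

-- the common value: sum over the string of (length of suffix starting at each vowel)
def pvG : List Char → Int
  | [] => 0
  | c :: cs => (if pvIsV c then (cs.length : Int) + 1 else 0) + pvG cs

lemma pvToList_mk (l : List Char) : (String.mk l).toList = l := Eq.symm (String.ofList_eq.mp rfl)

lemma pvTest_eq (c : Char) :
    (PySem.Str.lower (String.mk [c]) ∈ (["a", "e", "i", "o", "u"] : List String)) ↔ pvIsV c = true := by
  simp [PySem.Str.lower, PySem.Chars.lower, pvIsV, String.ext_iff, pvToList_mk]

lemma pvMem_eq (c : Char) : (PySem.Chars.lowerChar c ∈ "aeiou".toList) ↔ pvIsV c = true := by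
  have h : "aeiou".toList = ['a', 'e', 'i', 'o', 'u'] := rfl
  simp [h, pvIsV]

-- A's loop body with the vowel test reduced to pvIsV
def pvStepA (st : Int × Int) (i : Char) : Int × Int :=
  let count := if pvIsV i then st.1 + 1 else st.1
  (count, st.2 + count)

lemma pvStepA_eq :
    (fun (st : Int × Int) (i : Char) =>
      let count := if PySem.Str.lower (String.mk [i]) ∈ (["a", "e", "i", "o", "u"] : List String)
        then st.1 + 1 else st.1
      (count, st.2 + count)) = pvStepA := by
  funext st i
  by_cases h : pvIsV i = true <;> simp [pvStepA, pvTest_eq i, h]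

lemma solveA_aux (l : List Char) (count ans : Int) :
    (l.foldl pvStepA (count, ans)).2 = ans + count * (l.length : Int) + pvG l := by
  induction l generalizing count ans with
  | nil => simp [pvG]
  | cons c cs ih =>
    rw [List.foldl_cons, pvStepA, ih]
    by_cases h : pvIsV c = true <;> simp [pvG, h] <;> ring

lemma solveB_aux (l : List Char) (s acc n : Int) (hn : n = s + (l.length : Int)) :
    (PySem.List.enumerate l s).foldl
      (fun acc p => if PySem.Chars.lowerChar p.2 ∈ "aeiou".toList then acc + (n - p.1) else acc)
      acc = acc + pvG l := by
  induction l generalizing s acc with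
  | nil => simp [PySem.List.enumerate_nil, pvG]
  | cons c cs ih =>
    rw [PySem.List.enumerate_cons, List.foldl_cons,
      ih (s + 1) _ (by push_cast [List.length_cons] at hn ⊢; omega)]
    simp only [pvMem_eq c]
    by_cases h : pvIsV c = true <;> simp [pvG, h] <;>
      push_cast [List.length_cons] at hn ⊢ <;> omega

-- ===== VERDICT (by name: the statement is the Claim_ definition above) =====
theorem solve_spec : Claim_equal_solve := by
  intro A _
  unfold Spec_solve solve solve_alt
  rw [pvStepA_eq, solveA_aux, solveB_aux _ 0 0 _ (by simp [PySem.Str.len])]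
  ring
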